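-- pv_equiv track=rewrite | github.com/amphitheres/advent-of-code | 2024/day21.py | to_robot
-- ===== SOURCE A (Python) =====
-- def to_robot(vertex_map, shortest, arrows, xs, start='A'):
--     if len(xs) <= 0:
--         yield ''
--         return
--     end,*xss = xs
--     for left in shortest[start, end]:
--         for right in to_robot(vertex_map, shortest, arrows, xss, end):
--             yield left + right
-- ===== SOURCE B (Python) =====
-- def to_robot(vertex_map, shortest, arrows, xs, start='A'):
--     # Build the list of option-lists first, threading prev through xs,
--     # then take their Cartesian product with a left fold (last list varies fastest).
--     options = []
--     prev = start
--     for end in xs: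
--         options.append(shortest[prev, end])
--         prev = end
--     combos = ['']
--     for opt in options:
--         combos = [c + l for c in combos for l in opt]
--     yield from combos
-- ===== Notes on version B (the rewrite author's own statement) =====
-- stated objective: idiomatic
-- what changed: Replaces the recursive generator (Cartesian product built through recursion) by a two-phase iteration: first collect the option-list for every consecutive transition, then fold a Cartesian product over them.
import Mathlib
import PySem

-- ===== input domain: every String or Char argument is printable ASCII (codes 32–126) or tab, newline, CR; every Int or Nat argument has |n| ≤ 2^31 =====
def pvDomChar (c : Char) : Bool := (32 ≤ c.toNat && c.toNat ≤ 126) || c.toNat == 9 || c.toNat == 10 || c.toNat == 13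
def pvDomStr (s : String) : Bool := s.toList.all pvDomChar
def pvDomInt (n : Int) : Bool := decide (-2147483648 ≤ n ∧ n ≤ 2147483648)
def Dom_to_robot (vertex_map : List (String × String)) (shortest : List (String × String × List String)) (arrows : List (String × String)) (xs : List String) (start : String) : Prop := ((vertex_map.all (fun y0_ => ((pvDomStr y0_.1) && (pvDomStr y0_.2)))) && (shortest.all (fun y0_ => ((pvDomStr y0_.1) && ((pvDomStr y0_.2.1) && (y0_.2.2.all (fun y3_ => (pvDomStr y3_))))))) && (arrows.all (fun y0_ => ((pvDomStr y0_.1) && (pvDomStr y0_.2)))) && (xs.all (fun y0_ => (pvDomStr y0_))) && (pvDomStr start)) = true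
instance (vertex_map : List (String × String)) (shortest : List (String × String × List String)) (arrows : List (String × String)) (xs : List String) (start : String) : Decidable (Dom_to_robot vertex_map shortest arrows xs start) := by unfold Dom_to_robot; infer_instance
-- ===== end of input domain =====

-- B builds the transition option-lists first and folds a Cartesian product over them,
-- instead of A's recursive generator; equal lists of yielded strings on Pre_.

-- ===== PORT A =====
-- shortest[a, b]: first match in the association list (a dict has unique keys);
-- a missing key is a KeyError in Python and is excluded by Pre_to_robot.
def pvLookup (shortest : List (String × String × List String)) (a b : String) : List String :=
  ((shortest.find? (fun t => t.1 == a && t.2.1 == b)).map (fun t => t.2.2)).getD []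

def to_robot (vertex_map : List (String × String)) (shortest : List (String × String × List String)) (arrows : List (String × String)) (xs : List String) (start : String) : List String :=
  match xs with
  | [] => [""]
  | e :: xss =>
    (pvLookup shortest start e).flatMap (fun left =>
      (to_robot vertex_map shortest arrows xss e).map (fun right => left ++ right))

-- ===== PORT B =====
-- phase 1: the option-list for each consecutive transition, threading prev
def pvOptions (shortest : List (String × String × List String)) (xs : List String) (prev : String) : List (List String) :=
  match xs with
  | [] => []
  | e :: xss => pvLookup shortest prev e :: pvOptions shortest xss e

-- phase 2: Cartesian-product step, [c + l for c in combos for l in opt]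
def pvStep (combos : List String) (opt : List String) : List String :=
  combos.flatMap (fun c => opt.map (fun l => c ++ l))

def to_robot_alt (vertex_map : List (String × String)) (shortest : List (String × String × List String)) (arrows : List (String × String)) (xs : List String) (start : String) : List String :=
  (pvOptions shortest xs start).foldl pvStep [""]

-- ===== PRECONDITION & SPEC =====
-- Pre_ excludes exactly the inputs on which Python A raises KeyError: some consecutive
-- transition (prev, end) along start::xs has no entry in shortest.
def Pre_to_robot (vertex_map : List (String × String)) (shortest : List (String × String × List String)) (arrows : List (String × String)) (xs : List String) (start : String) : Prop :=
  (((start :: xs).zip xs).all (fun p => shortest.any (fun t => t.1 == p.1 && t.2.1 == p.2))) = true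
instance (vertex_map : List (String × String)) (shortest : List (String × String × List String)) (arrows : List (String × String)) (xs : List String) (start : String) : Decidable (Pre_to_robot vertex_map shortest arrows xs start) := by unfold Pre_to_robot; infer_instance

def pvWitness_to_robot : (List (String × String)) × (List (String × String × List String)) × (List (String × String)) × List String × String :=
  ([], [("A", "x", ["ab", "cd"]), ("x", "y", ["u", "v"])], [], ["x", "y"], "A")

def Spec_to_robot (vertex_map : List (String × String)) (shortest : List (String × String × List String)) (arrows : List (String × String)) (xs : List String) (start : String) (out : List String) : Prop := out = to_robot_alt vertex_map shortest arrows xs start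
instance (vertex_map : List (String × String)) (shortest : List (String × String × List String)) (arrows : List (String × String)) (xs : List String) (start : String) (out : List String) : Decidable (Spec_to_robot vertex_map shortest arrows xs start out) := by unfold Spec_to_robot; infer_instance

-- ===== CLAIM (what is proved, stated in full; the proofs are below) =====
def Claim_equal_to_robot : Prop := ∀ (vertex_map : List (String × String)) (shortest : List (String × String × List String)) (arrows : List (String × String)) (xs : List String) (start : String), Dom_to_robot vertex_map shortest arrows xs start → Pre_to_robot vertex_map shortest arrows xs start → Spec_to_robot vertex_map shortest arrows xs start (to_robot vertex_map shortest arrows xs start)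

-- ===== LEMMAS AND PROOFS =====

theorem foldl_pvStep (vertex_map : List (String × String)) (shortest : List (String × String × List String)) (arrows : List (String × String)) (xs : List String) :
    ∀ (prev : String) (acc : List String),
      (pvOptions shortest xs prev).foldl pvStep acc
        = acc.flatMap (fun c => (to_robot vertex_map shortest arrows xs prev).map (fun r => c ++ r)) := by
  induction xs with
  | nil =>
    intro prev acc
    simp [pvOptions, to_robot, List.flatMap_singleton']
  | cons e xss ih =>
    intro prev acc
    simp only [pvOptions, to_robot, List.foldl_cons, ih e]
    simp [pvStep, List.flatMap_assoc, List.flatMap_map, List.map_flatMap, List.map_map,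
      Function.comp_def, String.append_assoc]

theorem to_robot_spec : Claim_equal_to_robot := by
  intro vertex_map shortest arrows xs start _ _
  unfold Spec_to_robot to_robot_alt
  rw [foldl_pvStep vertex_map shortest arrows xs start [""]]
  simp
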